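-- pv_equiv track=rewrite | github.com/codetiger/MachineLearning-2048 | gamelogic.py | _checkOptimInMatrix
-- ===== SOURCE A (Python) =====
-- def _checkOptimInMatrix(matrix):
-- 	reverseRow = True
-- 	newFlatMat = [] # builds a 1d list in zipzag order
-- 	for row in matrix:
-- 		reverseRow = not reverseRow
-- 		newRow = row
-- 		if reverseRow:
-- 			newRow = reversed(row)
-- 		for val in newRow:
-- 			newFlatMat = newFlatMat + [val]
--
-- 	newFlatMat = [x for x in newFlatMat if x != 0] # removes 0s from the list
--
-- 	if all(earlier >= later for earlier, later in zip(newFlatMat, newFlatMat[1:])):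
-- 		return True
-- 	elif all(earlier <= later for earlier, later in zip(newFlatMat, newFlatMat[1:])):
-- 		return True
-- 	else:
-- 		return False
-- ===== SOURCE B (Python) =====
-- def _checkOptimInMatrix(matrix):
--     nonzero = [v for i, row in enumerate(matrix)
--                for v in (row[::-1] if i % 2 == 1 else row) if v != 0]
--     s = sorted(nonzero)
--     return nonzero == s or nonzero == s[::-1]
-- ===== Notes on version B (the rewrite author's own statement) =====
-- stated objective: idiomatic
-- what changed: Zigzag flattening becomes a single comprehension over enumerate (instead of a toggled flag with quadratic list-append), and the two adjacent-pair all(...) scans are replaced by comparing the nonzero list against its sorted order and the reverse of it.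
import Mathlib
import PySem

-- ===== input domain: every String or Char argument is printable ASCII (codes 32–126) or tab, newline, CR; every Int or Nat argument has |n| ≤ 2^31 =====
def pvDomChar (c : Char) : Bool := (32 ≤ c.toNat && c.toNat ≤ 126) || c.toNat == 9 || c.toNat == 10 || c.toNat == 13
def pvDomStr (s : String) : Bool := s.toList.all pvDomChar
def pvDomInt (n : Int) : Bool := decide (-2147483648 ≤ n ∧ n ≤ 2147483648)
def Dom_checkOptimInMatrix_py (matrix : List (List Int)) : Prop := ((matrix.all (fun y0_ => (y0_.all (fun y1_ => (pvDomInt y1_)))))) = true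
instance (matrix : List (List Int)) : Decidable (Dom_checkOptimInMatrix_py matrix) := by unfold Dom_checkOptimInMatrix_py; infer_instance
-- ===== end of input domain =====

-- B zigzag-flattens with a comprehension and judges monotonicity by comparing against the sorted list (idiomatic; same True/False as A's adjacent-pair scans).

-- ===== PORT A =====
-- the outer 'for row in matrix' loop with state (reverseRow, newFlatMat); inner loop 'newFlatMat = newFlatMat + [val]'
def checkOptimInMatrixA_loop : List (List Int) → Bool → List Int → List Int
  | [], _, acc => acc
  | row :: rest, reverseRow, acc =>
    let reverseRow' := !reverseRow
    let newRow := if reverseRow' then row.reverse else row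
    checkOptimInMatrixA_loop rest reverseRow' (newRow.foldl (fun a v => a ++ [v]) acc)

def checkOptimInMatrix_py (matrix : List (List Int)) : Bool :=
  let newFlatMat := checkOptimInMatrixA_loop matrix true []
  let newFlatMat := newFlatMat.filter (fun x => x ≠ 0)
  -- newFlatMat[1:] is PySem.List.slice (some 1) none = tail (PySem.List.slice_from_one)
  if ((newFlatMat.zip (PySem.List.slice newFlatMat (some 1) none)).all (fun p => decide (p.2 ≤ p.1))) then
    true
  else if ((newFlatMat.zip (PySem.List.slice newFlatMat (some 1) none)).all (fun p => decide (p.1 ≤ p.2))) then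
    true
  else
    false

-- ===== PORT B =====
-- the comprehension: for i,row in enumerate(matrix), row[::-1] (= reverse, PySem.List.slice?_none_none_neg_one) on odd i, keep v ≠ 0
def checkOptimInMatrix_py_alt (matrix : List (List Int)) : Bool :=
  let nonzero := (PySem.List.enumerate matrix 0).flatMap
    (fun p => (if PySem.Int.mod p.1 2 == 1 then p.2.reverse else p.2).filter (fun v => v ≠ 0))
  let s := PySem.List.sorted nonzero (fun x => x) false
  (nonzero == s) || (nonzero == s.reverse)

-- ===== PRECONDITION & SPEC =====
def Spec_checkOptimInMatrix_py (matrix : List (List Int)) (out : Bool) : Prop := out = checkOptimInMatrix_py_alt matrix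
instance (matrix : List (List Int)) (out : Bool) : Decidable (Spec_checkOptimInMatrix_py matrix out) := by unfold Spec_checkOptimInMatrix_py; infer_instance

-- ===== CLAIM (what is proved, stated in full; the proofs are below) =====
def Claim_equal_checkOptimInMatrix_py : Prop := ∀ (matrix : List (List Int)), Dom_checkOptimInMatrix_py matrix → Spec_checkOptimInMatrix_py matrix (checkOptimInMatrix_py matrix)

-- ===== LEMMAS AND PROOFS =====

-- parity of the toggled flag equals parity of the enumerate index
theorem parity_step (s : Int) :
    (!(decide ((PySem.Int.mod s 2 == 1) = true))) = decide ((PySem.Int.mod (s + 1) 2 == 1) = true) := by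
  rw [PySem.Int.mod_eq_emod_of_pos (by norm_num), PySem.Int.mod_eq_emod_of_pos (by norm_num)]
  simp only [beq_iff_eq]
  by_cases h : s % 2 = 1
  · simp only [h, decide_true, Bool.not_true]
    have : (s + 1) % 2 = 0 := by omega
    simp [this]
  · have hs : s % 2 = 0 := by omega
    have : (s + 1) % 2 = 1 := by omega
    simp [h, this]

-- A's accumulating zigzag loop appends the zigzag rows after acc; parity of the index replaces the toggled flag.
theorem aloop_eq (matrix : List (List Int)) :
    ∀ (s : Int) (acc : List Int),
      checkOptimInMatrixA_loop matrix (decide ((PySem.Int.mod s 2 == 1) = true)) acc =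
      acc ++ (PySem.List.enumerate matrix (s + 1)).flatMap
        (fun p => if PySem.Int.mod p.1 2 == 1 then p.2.reverse else p.2) := by
  induction matrix with
  | nil => intro s acc; simp [checkOptimInMatrixA_loop, PySem.List.enumerate_nil]
  | cons row rest ih =>
    intro s acc
    rw [PySem.List.enumerate_cons]
    simp only [checkOptimInMatrixA_loop, List.flatMap_cons, PySem.List.foldl_append_singleton]
    rw [parity_step s, ih (s + 1)]
    by_cases hpar : (PySem.Int.mod (s + 1) 2 == 1) = true <;>
      simp [List.append_assoc]

-- adjacent-pair `all` over zip l (tail l) equals IsChain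
theorem zip_tail_all_iff {r : Int → Int → Prop} [DecidableRel r] : ∀ (l : List Int),
    (((l.zip l.tail).all fun p => decide (r p.1 p.2)) = true) ↔ l.IsChain r
  | [] => by simp
  | [a] => by simp
  | a :: b :: t => by
    rw [show (a :: b :: t).tail = b :: t from rfl, List.zip_cons_cons, List.all_cons,
        List.isChain_cons_cons]
    simp only [Bool.and_eq_true, decide_eq_true_eq]
    exact and_congr Iff.rfl (zip_tail_all_iff (b :: t))

-- ascending: pairwise <= iff equals its own stable sort
theorem asc_iff_sorted (l : List Int) :
    l.Pairwise (· ≤ ·) ↔ l = PySem.List.sorted l (fun x => x) false := by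
  constructor
  · intro h
    exact (PySem.List.sorted_eq_self_of_pairwise l (fun x => x) h).symm
  · intro h
    rw [h]
    exact PySem.List.sorted_pairwise l (fun x => x)

-- descending: pairwise >= iff equals the reverse of its own stable sort
theorem desc_iff_sorted_rev (l : List Int) :
    l.Pairwise (fun a b => b ≤ a) ↔ l = (PySem.List.sorted l (fun x => x) false).reverse := by
  constructor
  · intro h
    have hrev : l.reverse.Pairwise (fun a b => a ≤ b) := by
      rw [List.pairwise_reverse]; exact h
    have hperm : l.reverse.Perm l := l.reverse_perm
    have := PySem.List.sorted_id_eq_of_perm_of_pairwise l l.reverse hperm hrev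
    rw [this, List.reverse_reverse]
  · intro h
    have hrev : l.reverse = PySem.List.sorted l (fun x => x) false := by
      have := congrArg List.reverse h
      rwa [List.reverse_reverse] at this
    have hp : l.reverse.Pairwise (fun a b => a ≤ b) := by
      rw [hrev]; exact PySem.List.sorted_pairwise l (fun x => x)
    rw [← List.pairwise_reverse]
    exact hp

-- the two flattened-and-filtered lists coincide
theorem flat_eq (matrix : List (List Int)) :
    (checkOptimInMatrixA_loop matrix true []).filter (fun x => x ≠ 0) =
    (PySem.List.enumerate matrix 0).flatMap
      (fun p => (if PySem.Int.mod p.1 2 == 1 then p.2.reverse else p.2).filter (fun v => v ≠ 0)) := by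
  have h := aloop_eq matrix (-1) []
  have hd : decide ((PySem.Int.mod (-1) 2 == 1) = true) = true := by decide
  rw [hd] at h
  have h0 : (-1 : Int) + 1 = 0 := by norm_num
  rw [h0] at h
  rw [h, List.nil_append]
  generalize PySem.List.enumerate matrix 0 = e
  induction e with
  | nil => simp
  | cons p t ih => simp only [List.flatMap_cons, List.filter_append, ih]

-- ===== VERDICT (by name: the statement is the Claim_ definition above) =====
theorem checkOptimInMatrix_py_spec : Claim_equal_checkOptimInMatrix_py := by
  intro matrix _
  unfold Spec_checkOptimInMatrix_py checkOptimInMatrix_py checkOptimInMatrix_py_alt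
  simp only [flat_eq matrix]
  set l := (PySem.List.enumerate matrix 0).flatMap
      (fun p => (if PySem.Int.mod p.1 2 == 1 then p.2.reverse else p.2).filter (fun v => v ≠ 0)) with hl
  set s := PySem.List.sorted l (fun x => x) false with hs
  rw [PySem.List.slice_from_one]
  have hge : (((l.zip l.tail).all fun p => decide (p.2 ≤ p.1)) = true) ↔ l = s.reverse := by
    haveI : Trans (fun a b : Int => b ≤ a) (fun a b : Int => b ≤ a) (fun a b : Int => b ≤ a) :=
      ⟨fun h1 h2 => le_trans h2 h1⟩
    exact (zip_tail_all_iff (r := fun a b => b ≤ a) l).trans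
      ((List.isChain_iff_pairwise (R := fun a b : Int => b ≤ a)).trans (desc_iff_sorted_rev l))
  have hle : (((l.zip l.tail).all fun p => decide (p.1 ≤ p.2)) = true) ↔ l = s := by
    haveI : Trans (fun a b : Int => a ≤ b) (fun a b : Int => a ≤ b) (fun a b : Int => a ≤ b) :=
      ⟨fun h1 h2 => le_trans h1 h2⟩
    exact (zip_tail_all_iff (r := fun a b => a ≤ b) l).trans
      ((List.isChain_iff_pairwise (R := fun a b : Int => a ≤ b)).trans (asc_iff_sorted l))
  have e1 : ((l.zip l.tail).all fun p => decide (p.2 ≤ p.1)) = (l == s.reverse) := by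
    rw [Bool.eq_iff_iff]; simp only [hge, beq_iff_eq]
  have e2 : ((l.zip l.tail).all fun p => decide (p.1 ≤ p.2)) = (l == s) := by
    rw [Bool.eq_iff_iff]; simp only [hle, beq_iff_eq]
  rw [e1, e2]
  cases hb1 : (l == s.reverse) <;> cases hb2 : (l == s) <;> simp
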